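-- pv_equiv track=rewrite | github.com/newkimjiwon/CodingTest | BAEKJOON/G5/1245번_농장 관리.py | bfs
-- ===== SOURCE A (Python) =====
-- from collections import deque
--
-- def bfs(mount, visit, start_y, start_x):
--     # 시작 위치의 높이
--     peak_height = mount[start_y][start_x]
--     # 봉우리 여부를 판단하는 플래그
--     is_peak = True
--     # bfs 큐 초기화
--     q = deque([(start_y, start_x)])
--     visit[start_y][start_x] = True
--
--     # 상하좌우 및 대각선을 포함한 8방향 이동
--     directions = [(0, 1), (0, -1), (1, 0), (-1, 0), (1, 1), (1, -1), (-1, 1), (-1, -1)]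
--
--     while q:
--         y, x = q.popleft()
--
--         for dy, dx in directions:
--             ny, nx = y + dy, x + dx
--             # 격자 범위 내에서만 탐색
--             if 0 <= ny < len(mount) and 0 <= nx < len(mount[0]):
--                 if mount[ny][nx] > peak_height:
--                     # 인접 격자가 현재 높이보다 크면 산봉우리가 아님
--                     is_peak = False
--                 elif mount[ny][nx] == peak_height and not visit[ny][nx]:
--                     # 같은 높이의 인접 격자를 탐색
--                     visit[ny][nx] = True
--                     q.append((ny, nx))
--
--     return is_peak  # 봉우리인지 여부를 반환
-- ===== SOURCE B (Python) =====
-- # Two-phase re-implementation: the flood tracks the equal-height component in a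
-- # `seen` set (the original visit grid is read but never updated during the loop;
-- # it is marked wholesale afterwards, ending identical to A's), then a separate
-- # border scan decides peak-ness. Equivalence is about the RETURN value; `visit`
-- # ends in the same state, though intermediate mutation timing differs.
-- DIRS = ((0, 1), (0, -1), (1, 0), (-1, 0), (1, 1), (1, -1), (-1, 1), (-1, -1))
--
-- def bfs(mount, visit, start_y, start_x):
--     peak = mount[start_y][start_x]
--     H, W = len(mount), len(mount[0])
--     visit[start_y][start_x] = True
--     seen = {(start_y, start_x)}
--     queue = [(start_y, start_x)]
--     i = 0
--     while i < len(queue):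
--         y, x = queue[i]
--         i += 1
--         for dy, dx in DIRS:
--             ny, nx = y + dy, x + dx
--             if (0 <= ny < H and 0 <= nx < W and mount[ny][nx] == peak
--                     and not visit[ny][nx] and (ny, nx) not in seen):
--                 seen.add((ny, nx))
--                 queue.append((ny, nx))
--     for y, x in queue:
--         visit[y][x] = True
--     return all(not (0 <= y + dy < H and 0 <= x + dx < W and mount[y + dy][x + dx] > peak)
--                for y, x in queue for dy, dx in DIRS)
-- ===== Notes on version B (the rewrite author's own statement) =====
-- stated objective: alternative
-- what changed: A decides peak-ness inline while flooding, reading and mutating the visit grid to track the frontier; B floods with component membership kept in a separate seen-set against the untouched visit grid and decides peak-ness in a second border-scan pass over the collected queue.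
-- outside the precondition, e.g. on bfs([[1], [2, 3]], [[False], [False, False]], 0, 0): A returns False, B returns False
import Mathlib
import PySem

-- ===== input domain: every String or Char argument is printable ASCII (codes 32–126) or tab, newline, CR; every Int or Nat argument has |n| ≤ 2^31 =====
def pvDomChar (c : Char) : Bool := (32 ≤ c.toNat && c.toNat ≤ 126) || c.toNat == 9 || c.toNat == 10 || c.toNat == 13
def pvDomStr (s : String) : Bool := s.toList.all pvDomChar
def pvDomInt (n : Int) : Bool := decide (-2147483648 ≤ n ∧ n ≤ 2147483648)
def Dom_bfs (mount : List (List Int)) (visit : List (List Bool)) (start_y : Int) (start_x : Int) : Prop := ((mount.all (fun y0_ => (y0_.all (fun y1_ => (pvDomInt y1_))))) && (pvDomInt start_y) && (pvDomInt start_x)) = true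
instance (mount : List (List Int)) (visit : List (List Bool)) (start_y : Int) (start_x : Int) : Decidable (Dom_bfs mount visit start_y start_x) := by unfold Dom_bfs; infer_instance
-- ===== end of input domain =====

-- B replaces A's single BFS (which reads/mutates the visit grid and flips a peak
-- flag inline) by a flood that tracks the component in a separate seen-SET against
-- the untouched visit grid, followed by a second-pass border scan of the collected
-- queue; equivalence is about the RETURN value (both Pythons leave `visit` in the
-- same final state, though B writes its flood marks only after the loop).


-- ===== PORT A =====
-- m[i][j] (none = IndexError, exact via pyGet?)
def pvGet2 {α : Type} (m : List (List α)) (i j : Int) : Option α :=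
  (PySem.List.pyGet? m i).bind (fun r => PySem.List.pyGet? r j)

-- m[i][j] = b : exact where Python succeeds; no-op where Python raises (excluded by Pre_)
def pvSet2 {α : Type} (m : List (List α)) (i j : Int) (b : α) : List (List α) :=
  match PySem.List.pyGet? m i with
  | none => m
  | some r => PySem.List.pySetD m i (PySem.List.pySetD r j b)

-- len(mount[0]) (mount is non-empty whenever Python evaluates this; exact there)
def pvW (m : List (List Int)) : Int := ((m.headD []).length : Int)

def pvDirs : List (Int × Int) := [(0, 1), (0, -1), (1, 0), (-1, 0), (1, 1), (1, -1), (-1, 1), (-1, -1)]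

-- number of still-unvisited cells: the termination measure of A's loop
def pvUnvis (v : List (List Bool)) : Nat := (v.map (fun r => r.count false)).sum

-- one direction step of A's inner `for dy, dx in directions` loop, state (q, visit, is_peak)
def pvStepA (mount : List (List Int)) (peak y x : Int)
    (s : List (Int × Int) × List (List Bool) × Bool) (d : Int × Int) :
    List (Int × Int) × List (List Bool) × Bool :=
  let ny := y + d.1
  let nx := x + d.2
  if 0 ≤ ny ∧ ny < (mount.length : Int) ∧ 0 ≤ nx ∧ nx < pvW mount then
    match pvGet2 mount ny nx with
    | none => s        -- Python raises here (ragged row); outside Pre_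
    | some h =>
      if peak < h then (s.1, s.2.1, false)
      else if h = peak then
        match pvGet2 s.2.1 ny nx with
        | some false => (s.1 ++ [(ny, nx)], pvSet2 s.2.1 ny nx true, s.2.2)
        | some true => s
        | none => s    -- Python raises here (visit shape mismatch); outside Pre_
      else s
  else s

-- measure facts needed by A's loop's `decreasing_by` (cited there by name)
theorem pvCount_set_false (l : List Bool) (j : Nat) (h : j < l.length) (hf : l[j] = false) :
    (l.set j true).count false + 1 = l.count false := by
  induction l generalizing j with
  | nil => simp at h
  | cons a t ih =>
    cases j with
    | zero => simp_all
    | succ n =>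
      rw [List.set_cons_succ, List.count_cons, List.count_cons]
      have := ih n (by simpa using h) (by simpa using hf)
      omega

theorem pvUnvis_set2 (v : List (List Bool)) (i j : Int) (hi : 0 ≤ i) (hj : 0 ≤ j)
    (hget : pvGet2 v i j = some false) : pvUnvis (pvSet2 v i j true) + 1 = pvUnvis v := by
  simp only [pvGet2] at hget
  rcases hvi : PySem.List.pyGet? v i with _ | r
  · rw [hvi] at hget; cases hget
  · rw [hvi] at hget
    simp only [Option.bind_some] at hget
    rw [PySem.List.pyGet?_of_nonneg v hi] at hvi
    rw [PySem.List.pyGet?_of_nonneg r hj] at hget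
    have hil : i.toNat < v.length := (List.getElem?_eq_some_iff.mp hvi).1
    have hrv : r = v[i.toNat] := ((List.getElem?_eq_some_iff.mp hvi).2).symm
    have hjl : j.toNat < r.length := (List.getElem?_eq_some_iff.mp hget).1
    have hrj : r[j.toNat] = false := (List.getElem?_eq_some_iff.mp hget).2
    simp only [pvSet2]
    rw [PySem.List.pyGet?_of_nonneg v hi, hvi]
    dsimp only
    rw [PySem.List.pySetD_of_nonneg v _ hi, PySem.List.pySetD_of_nonneg r _ hj]
    have hrow := pvCount_set_false r j.toNat hjl hrj
    unfold pvUnvis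
    rw [List.map_set]
    have hsum : ∀ (L : List Nat) (k : Nat) (m : Nat) (h : k < L.length),
        (L.set k m).sum + L[k] = L.sum + m := by
      intro L
      induction L with
      | nil => intro k m h; simp at h
      | cons a t ih =>
        intro k m h
        cases k with
        | zero => simp [Nat.add_comm, Nat.add_left_comm]
        | succ n =>
          rw [List.set_cons_succ]
          simp only [List.sum_cons, List.getElem_cons_succ]
          have := ih n m (by simpa using h)
          omega
    have := hsum (v.map (fun r => r.count false)) i.toNat ((r.set j.toNat true).count false)
      (by simpa using hil)
    rw [List.getElem_map, ← hrv] at this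
    omega

theorem pvStepA_measure (mount : List (List Int)) (peak y x : Int)
    (s : List (Int × Int) × List (List Bool) × Bool) (d : Int × Int) :
    (pvStepA mount peak y x s d).1.length + 2 * pvUnvis (pvStepA mount peak y x s d).2.1
      ≤ s.1.length + 2 * pvUnvis s.2.1 := by
  simp only [pvStepA]
  split
  · rename_i hin
    rcases h : pvGet2 mount (y + d.1) (x + d.2) with _ | hh
    · simp
    · simp only []
      split
      · simp
      · split
        · rcases hv : pvGet2 s.2.1 (y + d.1) (x + d.2) with _ | b
          · simp
          · cases b
            · simp only []
              have := pvUnvis_set2 s.2.1 (y + d.1) (x + d.2) (by omega) (by omega) hv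
              simp only [List.length_append, List.length_cons, List.length_nil]
              omega
            · simp
        · simp
  · simp

def pvLoopA (mount : List (List Int)) (peak : Int) :
    List (Int × Int) → List (List Bool) → Bool → Bool
  | [], _, f => f
  | (y, x) :: qs, v, f =>
    let s := pvDirs.foldl (pvStepA mount peak y x) (qs, v, f)
    pvLoopA mount peak s.1 s.2.1 s.2.2
termination_by q v _ => q.length + 2 * pvUnvis v
decreasing_by
  have hfold : ∀ (ds : List (Int × Int)) (s : List (Int × Int) × List (List Bool) × Bool),
      (ds.foldl (pvStepA mount peak y x) s).1.length
        + 2 * pvUnvis (ds.foldl (pvStepA mount peak y x) s).2.1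
        ≤ s.1.length + 2 * pvUnvis s.2.1 := by
    intro ds
    induction ds with
    | nil => intro s; simp
    | cons d ds ih =>
      intro s
      calc _ ≤ (pvStepA mount peak y x s d).1.length
                + 2 * pvUnvis (pvStepA mount peak y x s d).2.1 := ih _
        _ ≤ _ := pvStepA_measure mount peak y x s d
  have := hfold pvDirs (qs, v, f)
  dsimp only at this
  simp only [List.length_cons]
  omega

-- A, transliterated: peak height, mark start, BFS with the in-loop peak flag
def bfs (mount : List (List Int)) (visit : List (List Bool)) (start_y : Int) (start_x : Int) : Bool :=
  match pvGet2 mount start_y start_x with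
  | none => true     -- Python raises IndexError here; outside Pre_
  | some peak =>
    pvLoopA mount peak [(start_y, start_x)] (pvSet2 visit start_y start_x true) true

-- ===== PORT B =====
-- one direction step of B's flood: the visit grid vB is READ-ONLY, the component
-- membership lives in the seen set; state (queue-tail, seen), no flag
def pvStepB (mount : List (List Int)) (vB : List (List Bool)) (peak y x : Int)
    (s : List (Int × Int) × PySem.Set (Int × Int)) (d : Int × Int) :
    List (Int × Int) × PySem.Set (Int × Int) :=
  let ny := y + d.1
  let nx := x + d.2
  if 0 ≤ ny ∧ ny < (mount.length : Int) ∧ 0 ≤ nx ∧ nx < ((mount.headD []).length : Int) then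
    match pvGet2 mount ny nx with
    | none => s        -- Python raises here (ragged row); outside Pre_
    | some h =>
      if h = peak then
        match pvGet2 vB ny nx with
        | some false =>
          if PySem.Set.contains s.2 (ny, nx) then s
          else (s.1 ++ [(ny, nx)], PySem.Set.add s.2 (ny, nx))
        | some true => s
        | none => s    -- Python raises here (visit shape mismatch); outside Pre_
      else s
  else s

-- the in-bounds grid coordinates; the seen set only ever grows inside this list
-- (plus the start cell), which bounds B's loop
def pvCellsB (mount : List (List Int)) : List (Int × Int) :=
  (List.range mount.length).flatMap
    (fun i => (List.range (mount.headD []).length).map (fun j => (Int.ofNat i, Int.ofNat j)))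

def pvFreeB (mount : List (List Int)) (seen : PySem.Set (Int × Int)) : Nat :=
  ((pvCellsB mount).filter (fun c => !(PySem.Set.contains seen c))).length

theorem pvFilter_length_lt {α : Type} (l : List α) (p q : α → Bool)
    (himp : ∀ x, q x = true → p x = true) (c : α) (hc : c ∈ l)
    (hpc : p c = true) (hqc : q c = false) :
    (l.filter q).length < (l.filter p).length := by
  have hmono : ∀ t : List α, (t.filter q).length ≤ (t.filter p).length := by
    intro t
    induction t with
    | nil => simp
    | cons a t ih =>
      rw [List.filter_cons, List.filter_cons]
      by_cases hq : q a = true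
      · simp only [hq, himp a hq, if_true, List.length_cons]
        omega
      · rcases hp : p a <;> simp [hq, hp] <;> omega
  induction l with
  | nil => simp at hc
  | cons a t ih =>
    rw [List.filter_cons, List.filter_cons]
    rcases List.mem_cons.mp hc with h | h
    · subst h
      simp only [hpc, hqc, if_true, Bool.false_eq_true, if_false, List.length_cons]
      have := hmono t
      omega
    · have := ih h
      by_cases hq : q a = true
      · simp only [hq, himp a hq, if_true, List.length_cons]
        omega
      · rcases hp : p a <;> simp [hq, hp] <;> omega

theorem pvMem_cellsB (mount : List (List Int)) (i j : Int)
    (h1 : 0 ≤ i) (h2 : i < (mount.length : Int))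
    (h3 : 0 ≤ j) (h4 : j < ((mount.headD []).length : Int)) :
    (i, j) ∈ pvCellsB mount := by
  have hi' : i.toNat ∈ List.range mount.length := List.mem_range.mpr (by omega)
  have hj' : j.toNat ∈ List.range (mount.headD []).length := List.mem_range.mpr (by omega)
  unfold pvCellsB
  apply List.mem_flatMap.mpr
  refine ⟨i.toNat, hi', ?_⟩
  apply List.mem_map.mpr
  refine ⟨j.toNat, hj', ?_⟩
  have h5 : Int.ofNat i.toNat = i := by simpa using Int.toNat_of_nonneg h1
  have h6 : Int.ofNat j.toNat = j := by simpa using Int.toNat_of_nonneg h3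
  rw [h5, h6]

theorem pvSeen_mono {s : PySem.Set (Int × Int)} {c x : Int × Int}
    (h : PySem.Set.contains (PySem.Set.add s c) x = false) :
    PySem.Set.contains s x = false := by
  rcases hx : PySem.Set.contains s x
  · rfl
  · exfalso
    have hmem : x ∈ s := (PySem.Set.contains_iff s x).mp hx
    have : x ∈ PySem.Set.add s c := (PySem.Set.mem_add s c x).mpr (Or.inl hmem)
    rw [← PySem.Set.contains_iff] at this
    rw [h] at this
    cases this

theorem pvStepB_measure (mount : List (List Int)) (vB : List (List Bool)) (peak y x : Int)
    (s : List (Int × Int) × PySem.Set (Int × Int)) (d : Int × Int) :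
    (pvStepB mount vB peak y x s d).1.length + 2 * pvFreeB mount (pvStepB mount vB peak y x s d).2
      ≤ s.1.length + 2 * pvFreeB mount s.2 := by
  simp only [pvStepB]
  split
  · rename_i hin
    rcases h : pvGet2 mount (y + d.1) (x + d.2) with _ | hh
    · simp
    · simp only []
      split
      · rcases hv : pvGet2 vB (y + d.1) (x + d.2) with _ | b
        · simp
        · cases b
          · rcases hc : PySem.Set.contains s.2 (y + d.1, x + d.2)
            · simp only [hc, Bool.false_eq_true, if_false]
              have hlt : pvFreeB mount (PySem.Set.add s.2 (y + d.1, x + d.2)) < pvFreeB mount s.2 := by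
                apply pvFilter_length_lt _ _ _
                  (fun z hz => by
                    rcases hzz : PySem.Set.contains s.2 z
                    · rfl
                    · exfalso
                      have := pvSeen_mono (c := (y + d.1, x + d.2)) (x := z) (s := s.2)
                      simp only [Bool.not_eq_true'] at hz
                      rw [this hz] at hzz; cases hzz)
                  (y + d.1, x + d.2)
                  (pvMem_cellsB mount _ _ (by omega) (by omega) (by omega) (by omega))
                  (by simp only [hc, Bool.not_false]) ?_
                have hm : (y + d.1, x + d.2) ∈ PySem.Set.add s.2 (y + d.1, x + d.2) :=
                  (PySem.Set.mem_add _ _ _).mpr (Or.inr rfl)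
                rw [← PySem.Set.contains_iff] at hm
                simp only [hm, Bool.not_true]
              simp only [List.length_append, List.length_cons, List.length_nil]
              omega
            · simp [hc]
          · simp
      · simp
  · simp

-- phase 1 of B: consume the queue, return ALL cells ever enqueued, in order
def pvLoopB (mount : List (List Int)) (vB : List (List Bool)) (peak : Int) :
    List (Int × Int) → PySem.Set (Int × Int) → List (Int × Int)
  | [], _ => []
  | (y, x) :: qs, seen =>
    let s := pvDirs.foldl (pvStepB mount vB peak y x) (qs, seen)
    (y, x) :: pvLoopB mount vB peak s.1 s.2
termination_by q seen => q.length + 2 * pvFreeB mount seen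
decreasing_by
  have hfold : ∀ (ds : List (Int × Int)) (s : List (Int × Int) × PySem.Set (Int × Int)),
      (ds.foldl (pvStepB mount vB peak y x) s).1.length
        + 2 * pvFreeB mount (ds.foldl (pvStepB mount vB peak y x) s).2
        ≤ s.1.length + 2 * pvFreeB mount s.2 := by
    intro ds
    induction ds with
    | nil => intro s; simp
    | cons d ds ih =>
      intro s
      calc _ ≤ (pvStepB mount vB peak y x s d).1.length
                + 2 * pvFreeB mount (pvStepB mount vB peak y x s d).2 := ih _
        _ ≤ _ := pvStepB_measure mount vB peak y x s d
  have := hfold pvDirs (qs, seen)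
  dsimp only at this
  simp only [List.length_cons]
  omega

-- phase 2 of B: `not (0 <= ny < H and 0 <= nx < W and mount[ny][nx] > peak)` for one direction
def pvNbOk (mount : List (List Int)) (peak y x : Int) (d : Int × Int) : Bool :=
  let ny := y + d.1
  let nx := x + d.2
  !(decide (0 ≤ ny ∧ ny < (mount.length : Int) ∧ 0 ≤ nx ∧ nx < ((mount.headD []).length : Int))
    && (match pvGet2 mount ny nx with
        | some h => decide (peak < h)
        | none => false))   -- Python raises here; outside Pre_

-- B, transliterated: mark the start in visit, flood with the seen set against that
-- grid collecting the queue, then the all(...) border scan over the queue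
def bfs_alt (mount : List (List Int)) (visit : List (List Bool)) (start_y : Int) (start_x : Int) : Bool :=
  match pvGet2 mount start_y start_x with
  | none => true     -- Python raises IndexError here; outside Pre_
  | some peak =>
    let vB := pvSet2 visit start_y start_x true
    (pvLoopB mount vB peak [(start_y, start_x)] (PySem.Set.ofList [(start_y, start_x)])).all
      (fun c => pvDirs.all (pvNbOk mount peak c.1 c.2))

-- ===== PRECONDITION & SPEC =====
-- Pre_ excludes inputs where Python raises IndexError: starts outside the (wrap-inclusive)
-- grid range, and grids whose rows are ragged or whose visit shape differs from mount —
-- there A in general raises; a ragged grid whose short rows the flood never reaches still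
-- returns and is also excluded by this closed-form shape condition (see cite).
def Pre_bfs (mount : List (List Int)) (visit : List (List Bool)) (start_y : Int) (start_x : Int) : Prop :=
  0 < mount.length ∧
  (∀ r ∈ mount, r.length = (mount.headD []).length) ∧
  visit.length = mount.length ∧
  (∀ r ∈ visit, r.length = (mount.headD []).length) ∧
  -(mount.length : Int) ≤ start_y ∧ start_y < (mount.length : Int) ∧
  -((mount.headD []).length : Int) ≤ start_x ∧ start_x < ((mount.headD []).length : Int)
instance (mount : List (List Int)) (visit : List (List Bool)) (start_y : Int) (start_x : Int) : Decidable (Pre_bfs mount visit start_y start_x) := by unfold Pre_bfs; infer_instance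

def pvWitness_bfs : List (List Int) × List (List Bool) × Int × Int :=
  ([[1, 2], [0, 1]], [[false, false], [false, false]], 0, 0)

def Spec_bfs (mount : List (List Int)) (visit : List (List Bool)) (start_y : Int) (start_x : Int) (out : Bool) : Prop := out = bfs_alt mount visit start_y start_x
instance (mount : List (List Int)) (visit : List (List Bool)) (start_y : Int) (start_x : Int) (out : Bool) : Decidable (Spec_bfs mount visit start_y start_x out) := by unfold Spec_bfs; infer_instance

-- ===== CLAIM (what is proved, stated in full; the proofs are below) =====
def Claim_equal_bfs : Prop := ∀ (mount : List (List Int)) (visit : List (List Bool)) (start_y : Int) (start_x : Int), Dom_bfs mount visit start_y start_x → Pre_bfs mount visit start_y start_x → Spec_bfs mount visit start_y start_x (bfs mount visit start_y start_x)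

-- ===== LEMMAS AND PROOFS =====

-- the simulation relation between A's evolving visit grid v and B's pair
-- (read-only grid vB, seen set): at every nonnegative coordinate, v reads True
-- iff vB reads True or the cell is in seen, and False iff vB reads False
-- and the cell is not in seen
def pvInv (vB v : List (List Bool)) (seen : PySem.Set (Int × Int)) : Prop :=
  ∀ i j : Int, 0 ≤ i → 0 ≤ j →
    ((pvGet2 v i j = some true ↔
        (pvGet2 vB i j = some true ∨ PySem.Set.contains seen (i, j) = true)) ∧
     (pvGet2 v i j = some false ↔
        (pvGet2 vB i j = some false ∧ PySem.Set.contains seen (i, j) = false)))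

-- reading back the cell just written
theorem pvGet2_set2_self {α : Type} (v : List (List α)) (i j : Int) (b0 b : α)
    (hi : 0 ≤ i) (hj : 0 ≤ j) (h : pvGet2 v i j = some b0) :
    pvGet2 (pvSet2 v i j b) i j = some b := by
  simp only [pvGet2, pvSet2] at *
  rcases hvi : PySem.List.pyGet? v i with _ | r
  · rw [hvi] at h; try cases h
  · rw [hvi] at h
    simp only [Option.bind_some] at h
    dsimp only
    rw [PySem.List.pyGet?_of_nonneg v hi] at hvi
    rw [PySem.List.pyGet?_of_nonneg r hj] at h
    have hil : i.toNat < v.length := (List.getElem?_eq_some_iff.mp hvi).1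
    have hjl : j.toNat < r.length := (List.getElem?_eq_some_iff.mp h).1
    rw [PySem.List.pySetD_of_nonneg v _ hi, PySem.List.pySetD_of_nonneg r _ hj,
      PySem.List.pyGet?_of_nonneg _ hi, List.getElem?_set_self (by simpa using hil)]
    rw [Option.bind_some, PySem.List.pyGet?_of_nonneg _ hj]
    rw [List.getElem?_set_self (by simpa using hjl)]

-- reading any other cell after the write
theorem pvGet2_set2_other {α : Type} (v : List (List α)) (i j i' j' : Int) (b0 b : α)
    (hi : 0 ≤ i) (hj : 0 ≤ j) (hi' : 0 ≤ i') (hj' : 0 ≤ j')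
    (hne : ¬(i' = i ∧ j' = j)) (h : pvGet2 v i j = some b0) :
    pvGet2 (pvSet2 v i j b) i' j' = pvGet2 v i' j' := by
  simp only [pvGet2, pvSet2] at *
  rcases hvi : PySem.List.pyGet? v i with _ | r
  · rw [hvi] at h; try cases h
  · rw [hvi] at h
    simp only [Option.bind_some] at h
    dsimp only
    rw [PySem.List.pyGet?_of_nonneg v hi] at hvi
    rw [PySem.List.pySetD_of_nonneg v _ hi, PySem.List.pySetD_of_nonneg r _ hj]
    by_cases hii : i' = i
    · subst hii
      have hjj : j' ≠ j := fun hh => hne ⟨rfl, hh⟩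
      rw [PySem.List.pyGet?_of_nonneg _ hi', PySem.List.pyGet?_of_nonneg v hi',
        List.getElem?_set_self (by simpa using (List.getElem?_eq_some_iff.mp hvi).1), hvi]
      simp only [Option.bind_some]
      rw [PySem.List.pyGet?_of_nonneg _ hj', PySem.List.pyGet?_of_nonneg r hj',
        List.getElem?_set_ne (by omega)]
    · rw [PySem.List.pyGet?_of_nonneg _ hi', PySem.List.pyGet?_of_nonneg v hi',
        List.getElem?_set_ne (by omega)]

-- adding the freshly marked cell preserves the relation
theorem pvInv_add (vB v : List (List Bool)) (seen : PySem.Set (Int × Int)) (i j : Int)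
    (hInv : pvInv vB v seen) (hi : 0 ≤ i) (hj : 0 ≤ j)
    (hv : pvGet2 v i j = some false) :
    pvInv vB (pvSet2 v i j true) (PySem.Set.add seen (i, j)) := by
  intro i' j' hi' hj'
  have hcontains : ∀ c : Int × Int,
      PySem.Set.contains (PySem.Set.add seen (i, j)) c = true ↔
        (PySem.Set.contains seen c = true ∨ c = (i, j)) := by
    intro c
    rw [PySem.Set.contains_iff, PySem.Set.mem_add, ← PySem.Set.contains_iff]
  by_cases hc : i' = i ∧ j' = j
  · obtain ⟨h1, h2⟩ := hc; subst h1; subst h2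
    have hget := pvGet2_set2_self v i' j' false true hi hj hv
    have hcon : PySem.Set.contains (PySem.Set.add seen (i', j')) (i', j') = true :=
      (hcontains _).mpr (Or.inr rfl)
    constructor
    · rw [hget, hcon]; simp
    · rw [hget, hcon]; simp
  · have hget := pvGet2_set2_other v i j i' j' false true hi hj hi' hj' hc hv
    have hcon : PySem.Set.contains (PySem.Set.add seen (i, j)) (i', j')
        = PySem.Set.contains seen (i', j') := by
      rcases hcc : PySem.Set.contains seen (i', j')
      · rcases hdd : PySem.Set.contains (PySem.Set.add seen (i, j)) (i', j')
        · rfl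
        · exfalso
          rcases (hcontains _).mp hdd with h | h
          · rw [hcc] at h; cases h
          · exact hc ⟨congrArg Prod.fst h, congrArg Prod.snd h⟩
      · exact (hcontains _).mpr (Or.inl hcc)
    rw [hget, hcon]
    exact hInv i' j' hi' hj'

-- one direction step: A's step is B's step plus the flag factored out as pvNbOk
theorem pvStepAB_sim (mount : List (List Int)) (vB : List (List Bool)) (peak y x : Int)
    (q : List (Int × Int)) (v : List (List Bool)) (seen : PySem.Set (Int × Int)) (f : Bool)
    (d : Int × Int) (hInv : pvInv vB v seen) :
    ∃ v', pvStepA mount peak y x (q, v, f) d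
        = ((pvStepB mount vB peak y x (q, seen) d).1, v', f && pvNbOk mount peak y x d)
      ∧ pvInv vB v' (pvStepB mount vB peak y x (q, seen) d).2 := by
  simp only [pvStepA, pvStepB, pvNbOk, pvW]
  by_cases hin : 0 ≤ y + d.1 ∧ y + d.1 < (mount.length : Int) ∧ 0 ≤ x + d.2
      ∧ x + d.2 < ((mount.headD []).length : Int)
  · obtain ⟨h1, h2, h3, h4⟩ := hin
    simp only [h1, h2, h3, h4, and_self, if_true, decide_true, Bool.true_and]
    rcases hm : pvGet2 mount (y + d.1) (x + d.2) with _ | hh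
    · exact ⟨v, by simp, hInv⟩
    · simp only []
      by_cases hlt : peak < hh
      · have hne : ¬ hh = peak := by omega
        simp only [hlt, if_true, hne, if_false, decide_true, Bool.not_true, Bool.and_false]
        exact ⟨v, rfl, hInv⟩
      · simp only [hlt, if_false, decide_false, Bool.not_false, Bool.and_true]
        by_cases heq : hh = peak
        · simp only [heq, if_true]
          have hiff := hInv (y + d.1) (x + d.2) h1 h3
          rcases hv : pvGet2 v (y + d.1) (x + d.2) with _ | b
          · -- A reads nothing: B reads nothing either
            have hB : pvGet2 vB (y + d.1) (x + d.2) = none := by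
              rcases hb : pvGet2 vB (y + d.1) (x + d.2) with _ | b'
              · rfl
              · exfalso
                cases b'
                · rcases hcc : PySem.Set.contains seen (y + d.1, x + d.2)
                  · have := hiff.2.mpr ⟨hb, hcc⟩; rw [hv] at this; cases this
                  · have := hiff.1.mpr (Or.inr hcc); rw [hv] at this; cases this
                · have := hiff.1.mpr (Or.inl hb); rw [hv] at this; cases this
            rw [hB]
            exact ⟨v, rfl, hInv⟩
          · cases b
            · -- A marks and enqueues: so does B
              obtain ⟨hBf, hcf⟩ := hiff.2.mp hv
              rw [hBf]
              simp only [hcf, Bool.false_eq_true, if_false]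
              exact ⟨pvSet2 v (y + d.1) (x + d.2) true, rfl,
                pvInv_add vB v seen _ _ hInv h1 h3 hv⟩
            · -- A skips a visited cell: B reads True or finds it in seen
              rcases hiff.1.mp hv with hB | hcc
              · rw [hB]; exact ⟨v, rfl, hInv⟩
              · rcases hb : pvGet2 vB (y + d.1) (x + d.2) with _ | b'
                · exact ⟨v, rfl, hInv⟩
                · cases b'
                  · simp only [hcc, if_true]
                    exact ⟨v, rfl, hInv⟩
                  · exact ⟨v, rfl, hInv⟩
        · simp only [heq, if_false]
          exact ⟨v, rfl, hInv⟩
  · simp only [hin, if_false, decide_false, Bool.false_and, Bool.not_false, Bool.and_true]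
    exact ⟨v, rfl, hInv⟩

-- the whole direction fold
theorem pvFold_sim (mount : List (List Int)) (vB : List (List Bool)) (peak y x : Int) :
    ∀ (ds : List (Int × Int)) (q : List (Int × Int)) (v : List (List Bool))
      (seen : PySem.Set (Int × Int)) (f : Bool), pvInv vB v seen →
    ∃ v', ds.foldl (pvStepA mount peak y x) (q, v, f)
        = ((ds.foldl (pvStepB mount vB peak y x) (q, seen)).1, v',
           f && ds.all (pvNbOk mount peak y x))
      ∧ pvInv vB v' (ds.foldl (pvStepB mount vB peak y x) (q, seen)).2 := by
  intro ds
  induction ds with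
  | nil => intro q v seen f hInv; exact ⟨v, by simp, hInv⟩
  | cons d ds ih =>
    intro q v seen f hInv
    obtain ⟨v₁, hstep, hInv₁⟩ := pvStepAB_sim mount vB peak y x q v seen f d hInv
    obtain ⟨v', hfold, hInv'⟩ :=
      ih (pvStepB mount vB peak y x (q, seen) d).1 v₁
        (pvStepB mount vB peak y x (q, seen) d).2 (f && pvNbOk mount peak y x d) hInv₁
    refine ⟨v', ?_, ?_⟩
    · simp only [List.foldl_cons, List.all_cons, hstep, hfold, Bool.and_assoc]
    · simpa only [List.foldl_cons] using hInv'
  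
-- A's whole loop = flag && B's phase-2 scan over B's flood
theorem pvLoop_sim (mount : List (List Int)) (vB : List (List Bool)) (peak : Int) :
    ∀ (q : List (Int × Int)) (seen : PySem.Set (Int × Int)) (v : List (List Bool)) (f : Bool),
      pvInv vB v seen →
      pvLoopA mount peak q v f
        = (f && (pvLoopB mount vB peak q seen).all
            (fun c => pvDirs.all (pvNbOk mount peak c.1 c.2))) := by
  intro q seen
  induction q, seen using pvLoopB.induct mount vB peak with
  | case1 seen => intro v f _; simp [pvLoopA, pvLoopB]
  | case2 y x qs seen s ih =>
    intro v f hInv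
    have hs : s = List.foldl (pvStepB mount vB peak y x) (qs, seen) pvDirs := rfl
    obtain ⟨v', hfold, hInv'⟩ := pvFold_sim mount vB peak y x pvDirs qs v seen f hInv
    rw [pvLoopA, pvLoopB]
    try dsimp only
    rw [hfold, ← hs]
    rw [ih v' (f && pvDirs.all (pvNbOk mount peak y x)) (hs ▸ hInv')]
    rw [List.all_cons, Bool.and_assoc]

-- ===== VERDICT (by name: the statement is the Claim_ definition above) =====
theorem bfs_spec : Claim_equal_bfs := by
  intro mount visit start_y start_x _ hPre
  obtain ⟨hH, hmrow, hvlen, hvrow, hy1, hy2, hx1, hx2⟩ := hPre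
  unfold Spec_bfs bfs bfs_alt
  rcases h : pvGet2 mount start_y start_x with _ | peak
  · rfl
  · dsimp only
    -- the marked start cell reads True whenever its coordinates are nonnegative
    have hstart : 0 ≤ start_y → 0 ≤ start_x →
        pvGet2 (pvSet2 visit start_y start_x true) start_y start_x = some true := by
      intro hys hxs
      have hyl : start_y.toNat < visit.length := by omega
      have hrow : visit[start_y.toNat].length = (mount.headD []).length :=
        hvrow _ (List.getElem_mem hyl)
      have hbase : pvGet2 visit start_y start_x = some (visit[start_y.toNat][start_x.toNat]) := by
        simp only [pvGet2]
        rw [PySem.List.pyGet?_of_nonneg visit hys, List.getElem?_eq_getElem hyl,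
          Option.bind_some, PySem.List.pyGet?_of_nonneg _ hxs,
          List.getElem?_eq_getElem (by omega)]
      exact pvGet2_set2_self visit start_y start_x _ true hys hxs hbase
    have hseen : ∀ c : Int × Int,
        PySem.Set.contains (PySem.Set.ofList [(start_y, start_x)]) c = true ↔
          c = (start_y, start_x) := by
      intro c
      rw [PySem.Set.contains_iff]
      simp [PySem.Set.ofList, PySem.Set.add, PySem.Set.empty, PySem.Set.contains, eq_comm]
    have hInv0 : pvInv (pvSet2 visit start_y start_x true) (pvSet2 visit start_y start_x true)
        (PySem.Set.ofList [(start_y, start_x)]) := by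
      intro i j hi hj
      constructor
      · constructor
        · intro hh; exact Or.inl hh
        · rintro (hh | hc)
          · exact hh
          · have := (hseen _).mp hc
            have h1 : i = start_y := congrArg Prod.fst this
            have h2 : j = start_x := congrArg Prod.snd this
            subst h1; subst h2
            exact hstart hi hj
      · constructor
        · intro hh
          refine ⟨hh, ?_⟩
          rcases hc : PySem.Set.contains (PySem.Set.ofList [(start_y, start_x)]) (i, j)
          · rfl
          · exfalso
            have := (hseen _).mp hc
            have h1 : i = start_y := congrArg Prod.fst this
            have h2 : j = start_x := congrArg Prod.snd this
            subst h1; subst h2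
            rw [hstart hi hj] at hh
            cases hh
        · rintro ⟨hh, _⟩; exact hh
    exact pvLoop_sim mount (pvSet2 visit start_y start_x true) peak
      [(start_y, start_x)] (PySem.Set.ofList [(start_y, start_x)])
      (pvSet2 visit start_y start_x true) true hInv0
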